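-- pv_equiv track=rewrite | github.com/tmorris42/push_swap | test.py | maximum_moves
-- ===== SOURCE A (Python) =====
-- def maximum_moves(number_of_numbers):
--     maximum = 0
--     reqs = (
--             (3, (3,)),
--             (5, (12,)),
--             (100, (700, 900, 1100, 1300, 1500)),
--             (500, (5500, 7000, 8500, 10000, 11500))
--             )
--     for cutoff in reqs:
--         if number_of_numbers <= cutoff[0]:
--             maximum = cutoff[1][0]
--             return maximum
-- ===== SOURCE B (Python) =====
-- import bisect
--
-- CUTOFFS = [3, 5, 100, 500]
-- VALUES = [3, 12, 700, 5500]
--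
-- def maximum_moves(number_of_numbers):
--     idx = bisect.bisect_left(CUTOFFS, number_of_numbers)
--     if idx < len(VALUES):
--         return VALUES[idx]
--     return None
-- ===== Notes on version B (the rewrite author's own statement) =====
-- stated objective: idiomatic
-- what changed: Replaced the linear early-return scan over (cutoff, reqs) tuples by a binary search (bisect_left) over a sorted cutoffs list with a parallel values list and an out-of-range fall-through to None.
import Mathlib
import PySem

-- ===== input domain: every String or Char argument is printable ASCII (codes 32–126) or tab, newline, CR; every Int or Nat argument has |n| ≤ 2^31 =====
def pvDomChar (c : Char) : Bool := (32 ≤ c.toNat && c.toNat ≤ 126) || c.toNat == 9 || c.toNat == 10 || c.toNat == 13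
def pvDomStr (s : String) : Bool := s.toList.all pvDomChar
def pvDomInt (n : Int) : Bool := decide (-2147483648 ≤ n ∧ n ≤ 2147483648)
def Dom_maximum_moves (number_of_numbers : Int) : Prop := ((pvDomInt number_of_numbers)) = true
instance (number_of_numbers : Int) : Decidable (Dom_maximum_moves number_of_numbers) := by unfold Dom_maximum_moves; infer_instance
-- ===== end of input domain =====

-- B replaces A's linear early-return scan over bracket tuples by a bisect_left binary search on a sorted cutoffs list with a parallel values list (idiomatic; same return values).


-- ===== PORT A =====
-- A's for-loop over the reqs tuples: first cutoff admitting n returns the head of its value tuple; fall-through returns none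
def goA (n : Int) : List (Int × List Int) → Option Int
  | [] => none
  | (c, vs) :: rest => if n ≤ c then some (vs.getD 0 0) else goA n rest

def maximum_moves (number_of_numbers : Int) : Option Int :=
  goA number_of_numbers [((3:Int), [(3:Int)]), (5, [12]), (100, [700, 900, 1100, 1300, 1500]), (500, [5500, 7000, 8500, 10000, 11500])]

-- ===== PORT B =====
-- transliteration of bisect.bisect_left's loop (while lo < hi: mid = (lo+hi)//2; …);
-- the fuel argument (always > hi - lo at the call) only makes the loop total and never runs out
def bisectGo (xs : List Int) (x : Int) : Nat → Nat → Nat → Nat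
  | 0, lo, _ => lo
  | fuel + 1, lo, hi =>
    if lo < hi then
      let mid := (lo + hi) / 2
      if xs.getD mid 0 < x then bisectGo xs x fuel (mid + 1) hi else bisectGo xs x fuel lo mid
    else lo

def bisectLeft (xs : List Int) (x : Int) : Nat := bisectGo xs x (xs.length + 1) 0 xs.length

def maximum_moves_alt (number_of_numbers : Int) : Option Int :=
  let idx := bisectLeft [(3:Int), 5, 100, 500] number_of_numbers
  if idx < 4 then some ([(3:Int), 12, 700, 5500].getD idx 0) else none

-- ===== PRECONDITION & SPEC =====
def Spec_maximum_moves (number_of_numbers : Int) (out : Option Int) : Prop := out = maximum_moves_alt number_of_numbers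
instance (number_of_numbers : Int) (out : Option Int) : Decidable (Spec_maximum_moves number_of_numbers out) := by unfold Spec_maximum_moves; infer_instance

-- ===== CLAIM (what is proved, stated in full; the proofs are below) =====
def Claim_equal_maximum_moves : Prop := ∀ (number_of_numbers : Int), Dom_maximum_moves number_of_numbers → Spec_maximum_moves number_of_numbers (maximum_moves number_of_numbers)

-- ===== LEMMAS AND PROOFS =====
-- full trace of the binary search on the concrete 4-element cutoffs list
lemma bisect_trace (n : Int) :
    bisectGo [(3:Int), 5, 100, 500] n 5 0 4 =
      (if n ≤ 3 then 0 else if n ≤ 5 then 1 else if n ≤ 100 then 2 else if n ≤ 500 then 3 else 4) := by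
  simp only [bisectGo, List.getD, List.getElem?_cons_succ, List.getElem?_cons_zero, Option.getD_some]
  norm_num
  split_ifs <;> omega

-- ===== VERDICT (by name: the statement is the Claim_ definition above) =====
theorem maximum_moves_spec : Claim_equal_maximum_moves := by
  intro n _
  unfold Spec_maximum_moves maximum_moves maximum_moves_alt bisectLeft
  rw [show (([(3:Int), 5, 100, 500] : List Int).length + 1) = 5 from rfl,
      show ([(3:Int), 5, 100, 500] : List Int).length = 4 from rfl, bisect_trace]
  simp only [goA, List.getD]
  split_ifs <;> simp_all
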